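-- pv_equiv track=rewrite | github.com/itsayellow/finddup | finddup.py | matching_array_groups
-- ===== SOURCE A (Python) =====
-- def matching_array_groups(datachunks_list):
--     """Return identical indicies groups from list of data chunks.
--
--     Args:
--         datachunks_list: list of arrays of data, all same size
--
--     Returns:
--         match_idx_groups: list of indicies_match_lists for matching data
--             arrays, each sublist has greater than one member
--         single_idx_groups: list of indicies for data arrays that don't
--             match any other data array (singletons)
--     """
--     match_idx_groups = []
--     # copy into remaining chunks
--     ungrp_chunk_indicies = range(len(datachunks_list))
--
--     # loop through chunks, looking for matches in unsearched chunks for first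
--     #   item in unsearched chunks
--     #   item will always match itself, may match others
--     #   save all matching indicies for this chunk into list of indicies
--     #       appended to match_idx_groups
--     while ungrp_chunk_indicies: # e.g. while len > 0
--         test_idx = ungrp_chunk_indicies[0]
--
--         matching_indicies = []
--         for i in ungrp_chunk_indicies:
--             if datachunks_list[i] == datachunks_list[test_idx]:
--                 matching_indicies.append(i)
--
--         match_idx_groups.append(matching_indicies)
--         ungrp_chunk_indicies = [
--                 x for x in ungrp_chunk_indicies if x not in matching_indicies]
--
--     single_idx_groups = [x[0] for x in match_idx_groups if len(x) == 1]
--     match_idx_groups = [x for x in match_idx_groups if x[0] not in single_idx_groups]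
--
--     return (match_idx_groups, single_idx_groups)
-- ===== SOURCE B (Python) =====
-- def matching_array_groups(datachunks_list):
--     """Group indices of identical data chunks in one pass via a dict keyed by chunk content."""
--     groups = {}
--     for i, chunk in enumerate(datachunks_list):
--         key = chunk if isinstance(chunk, bytes) else tuple(chunk)
--         groups.setdefault(key, []).append(i)
--     match_idx_groups = []
--     single_idx_groups = []
--     for idxs in groups.values():
--         if len(idxs) > 1:
--             match_idx_groups.append(idxs)
--         else:
--             single_idx_groups.append(idxs[0])
--     return (match_idx_groups, single_idx_groups)
-- ===== Notes on version B (the rewrite author's own statement) =====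
-- stated objective: simpler
-- what changed: Replaces A's while-loop that repeatedly rescans and refilters the remaining indices (and the final re-filter against the singleton heads) with one forward pass building a dict from chunk content to its index list, followed by a single partition pass over the dict's values.
import Mathlib
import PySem

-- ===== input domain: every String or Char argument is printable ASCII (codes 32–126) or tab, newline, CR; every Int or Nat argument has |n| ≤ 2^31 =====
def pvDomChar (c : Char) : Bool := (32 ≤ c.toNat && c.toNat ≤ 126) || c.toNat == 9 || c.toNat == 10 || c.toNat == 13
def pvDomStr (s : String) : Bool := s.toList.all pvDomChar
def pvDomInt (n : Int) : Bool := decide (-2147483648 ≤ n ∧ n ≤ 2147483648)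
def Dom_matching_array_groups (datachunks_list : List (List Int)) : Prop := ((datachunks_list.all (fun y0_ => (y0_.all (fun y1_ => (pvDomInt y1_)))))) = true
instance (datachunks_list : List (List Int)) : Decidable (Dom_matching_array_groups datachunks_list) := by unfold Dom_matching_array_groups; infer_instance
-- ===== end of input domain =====

-- B groups the indices in one pass with a dict keyed by chunk content instead of A's
-- repeated scan-and-refilter while loop; same return value.

-- ===== PORT A =====
-- the while loop: ungrp_chunk_indicies is the list of not-yet-grouped indices
def pvLoopA (cs : List (List Int)) (ungrp : List Int) (acc : List (List Int)) : List (List Int) :=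
  match ungrp with
  | [] => acc
  | t :: rest =>
    let matching := (t :: rest).filter (fun i => PySem.List.pyGetD cs i [] == PySem.List.pyGetD cs t [])
    pvLoopA cs ((t :: rest).filter (fun x => !(matching.contains x))) (acc ++ [matching])
termination_by ungrp.length
decreasing_by
  simp only [List.filter_cons, beq_self_eq_true, if_true, List.contains_cons, Bool.true_or,
    Bool.not_true, List.length_cons, if_false, Bool.false_eq_true]
  exact Nat.lt_succ_of_le (List.length_filter_le _ _)

def matching_array_groups (datachunks_list : List (List Int)) : List (List Int) × List Int :=
  let match_idx_groups :=
    pvLoopA datachunks_list (PySem.List.pyRange 0 (PySem.List.len datachunks_list) 1) []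
  let single_idx_groups :=
    (match_idx_groups.filter (fun x => PySem.List.len x == 1)).map (fun x => PySem.List.pyGetD x 0 0)
  (match_idx_groups.filter (fun x => !(single_idx_groups.contains (PySem.List.pyGetD x 0 0))),
   single_idx_groups)

-- ===== PORT B =====
def matching_array_groups_alt (datachunks_list : List (List Int)) : List (List Int) × List Int :=
  -- groups.setdefault(key, []).append(i), over enumerate(datachunks_list)
  let groups : PySem.Dict (List Int) (List Int) :=
    (datachunks_list.zipIdx).foldl
      (fun d p => d.modify p.1 [] (fun v => v ++ [(p.2 : Int)])) PySem.Dict.empty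
  groups.values.foldl
    (fun acc idxs =>
      if 1 < idxs.length then (acc.1 ++ [idxs], acc.2)
      else (acc.1, acc.2 ++ [PySem.List.pyGetD idxs 0 0]))
    ([], [])

-- ===== PRECONDITION & SPEC =====
def Spec_matching_array_groups (datachunks_list : List (List Int)) (out : List (List Int) × List Int) : Prop := out = matching_array_groups_alt datachunks_list
instance (datachunks_list : List (List Int)) (out : List (List Int) × List Int) : Decidable (Spec_matching_array_groups datachunks_list out) := by unfold Spec_matching_array_groups; infer_instance

-- ===== CLAIM (what is proved, stated in full; the proofs are below) =====
def Claim_equal_matching_array_groups : Prop := ∀ (datachunks_list : List (List Int)), Dom_matching_array_groups datachunks_list → Spec_matching_array_groups datachunks_list (matching_array_groups datachunks_list)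

-- ===== LEMMAS AND PROOFS =====

-- the common grouping skeleton: pairs (chunk, index), grouped by chunk, first occurrence first
def pvGrp : List (List Int × Int) → List (List Int)
  | [] => []
  | (c, t) :: r =>
    (t :: (r.filter (fun p => p.1 == c)).map (·.2)) :: pvGrp (r.filter (fun p => !(p.1 == c)))
termination_by l => l.length
decreasing_by
  simp only [List.length_unattach]
  exact Nat.lt_succ_of_le (le_trans (List.length_filter_le _ _) (by simp))

theorem pvLoopA_eq (cs : List (List Int)) (ungrp : List Int) (acc : List (List Int)) :
    pvLoopA cs ungrp acc = acc ++ pvGrp (ungrp.map (fun i => (PySem.List.pyGetD cs i [], i))) := by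
  fun_induction pvLoopA cs ungrp acc with
  | case1 => simp [pvGrp]
  | case2 acc t rest matching ih =>
    rw [ih]
    have hmatch : matching = t :: rest.filter (fun i => PySem.List.pyGetD cs i [] == PySem.List.pyGetD cs t []) := by
      simp [matching]
    have hfilt : (t :: rest).filter (fun x => !matching.contains x)
        = rest.filter (fun i => !(PySem.List.pyGetD cs i [] == PySem.List.pyGetD cs t [])) := by
      rw [List.filter_cons]
      have h0 : (!matching.contains t) = false := by
        simp [hmatch]
      rw [h0]
      simp only [Bool.false_eq_true, if_false]
      refine List.filter_congr ?_
      intro x hx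
      congr 1
      rw [List.contains_eq_mem, hmatch]
      by_cases hxt : x = t
      · subst hxt; simp
      · rw [Bool.eq_iff_iff]
        simp [List.mem_filter, hx, hxt]
    rw [hfilt]
    simp only [List.map_cons, pvGrp]
    rw [List.filter_map, List.filter_map, List.map_map]
    simp only [Function.comp_def]
    rw [hmatch]
    simp

theorem pvSet_ofList_filter {α : Type} [BEq α] [LawfulBEq α] (q : α → Bool) (l : List α) :
    PySem.Set.ofList (l.filter q) = (PySem.Set.ofList l).filter q := by
  induction l with
  | nil => rfl
  | cons x xs ih =>
    rw [List.filter_cons, PySem.Set.ofList_cons, List.filter_cons]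
    by_cases hx : q x = true
    · rw [if_pos hx, PySem.Set.ofList_cons, ih, if_pos hx]
      simp only [PySem.Set.discard, List.filter_filter]
      congr 1
      refine List.filter_congr ?_
      intro y _
      rw [Bool.and_comm]
    · rw [if_neg hx, ih, if_neg hx]
      simp only [PySem.Set.discard, List.filter_filter]
      refine (List.filter_congr ?_)
      intro y _
      by_cases hyx : y = x
      · subst hyx; simp [hx]
      · simp [hyx]

theorem pvGrp_eq_groups_aux : ∀ (n : Nat) (ps : List (List Int × Int)), ps.length ≤ n →
    (PySem.Set.ofList (ps.map (·.1))).map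
      (fun c => (ps.filter (fun p => p.1 == c)).map (·.2)) = pvGrp ps := by
  intro n
  induction n with
  | zero =>
    intro ps hps
    rw [List.length_eq_zero_iff.mp (Nat.le_zero.mp hps)]
    simp [pvGrp]
  | succ n ih =>
    intro ps hps
    match ps with
    | [] => simp [pvGrp]
    | (c, t) :: r =>
      rw [List.map_cons, PySem.Set.ofList_cons, List.map_cons, pvGrp]
      have hdis : (PySem.Set.ofList (r.map (·.1))).discard c
          = PySem.Set.ofList ((r.filter (fun p => !(p.1 == c))).map (·.1)) := by
        simp only [PySem.Set.discard]
        rw [← pvSet_ofList_filter, List.filter_map]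
        simp [Function.comp_def]
      congr 1
      · simp
      · rw [hdis]
        have hcong : ∀ c' ∈ PySem.Set.ofList ((r.filter (fun p => !(p.1 == c))).map (·.1)),
            (((c, t) :: r).filter (fun p => p.1 == c')).map (·.2)
              = ((r.filter (fun p => !(p.1 == c))).filter (fun p => p.1 == c')).map (·.2) := by
          intro c' hc'
          have hne : c' ≠ c := by
            rcases List.mem_map.mp ((PySem.Set.mem_ofList _ _).mp hc') with ⟨p, hp, hpe⟩
            rcases List.mem_filter.mp hp with ⟨-, hpc⟩
            rw [← hpe]
            simpa using hpc
          rw [List.filter_cons]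
          have hh : ((c, t).1 == c') = false := by
            simp [Ne.symm hne]
          rw [hh]
          simp only [Bool.false_eq_true, if_false]
          rw [List.filter_filter]
          refine congrArg _ (List.filter_congr ?_)
          intro p _
          by_cases hpc : p.1 = c
          · simp [hpc, Ne.symm hne]
          · simp [hpc]
        rw [List.map_congr_left hcong]
        refine ih _ ?_
        have h1 : (r.filter (fun p => !(p.1 == c))).length ≤ r.length := List.length_filter_le _ _
        have h2 : r.length ≤ n := by simpa using Nat.le_of_succ_le_succ hps
        omega

theorem pvGrp_mem_aux : ∀ (n : Nat) (ps : List (List Int × Int)), ps.length ≤ n →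
    ∀ g ∈ pvGrp ps, ∃ t l, g = t :: l ∧ t ∈ ps.map (·.2) := by
  intro n
  induction n with
  | zero =>
    intro ps hps
    rw [List.length_eq_zero_iff.mp (Nat.le_zero.mp hps)]
    simp [pvGrp]
  | succ n ih =>
    intro ps hps g hg
    match ps with
    | [] => simp [pvGrp] at hg
    | (c, t) :: r =>
      rw [pvGrp, List.mem_cons] at hg
      rcases hg with hg | hg
      · exact ⟨t, _, hg, by simp⟩
      · have hlen : (r.filter (fun p => !(p.1 == c))).length ≤ n := by
          have := List.length_filter_le (fun p => !(p.1 == c)) r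
          simp only [List.length_cons] at hps
          omega
        rcases ih _ hlen g hg with ⟨t', l', he, hm⟩
        refine ⟨t', l', he, ?_⟩
        rcases List.mem_map.mp hm with ⟨p, hp, hpe⟩
        exact List.mem_cons_of_mem _ (List.mem_map.mpr ⟨p, (List.filter_sublist (l := r)).mem hp, hpe⟩)

theorem pvGrp_heads_aux : ∀ (n : Nat) (ps : List (List Int × Int)), ps.length ≤ n →
    (ps.map (·.2)).Nodup → ((pvGrp ps).map (fun g => PySem.List.pyGetD g 0 0)).Nodup := by
  intro n
  induction n with
  | zero =>
    intro ps hps _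
    rw [List.length_eq_zero_iff.mp (Nat.le_zero.mp hps)]
    simp [pvGrp]
  | succ n ih =>
    intro ps hps hnd
    match ps with
    | [] => simp [pvGrp]
    | (c, t) :: r =>
      rw [pvGrp, List.map_cons, List.nodup_cons]
      simp only [PySem.List.pyGetD_zero_cons]
      have hlen : (r.filter (fun p => !(p.1 == c))).length ≤ n := by
        have := List.length_filter_le (fun p => !(p.1 == c)) r
        simp only [List.length_cons] at hps
        omega
      have hsub : ((r.filter (fun p => !(p.1 == c))).map (·.2)).Sublist (r.map (·.2)) :=
        (List.filter_sublist (l := r)).map _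
      simp only [List.map_cons, List.nodup_cons] at hnd
      constructor
      · intro hmem
        rcases List.mem_map.mp hmem with ⟨g, hg, hge⟩
        rcases pvGrp_mem_aux n _ hlen g hg with ⟨t', l', he, hm⟩
        have ht' : t' = t := by rw [he, PySem.List.pyGetD_zero_cons] at hge; exact hge
        exact hnd.1 (ht' ▸ hsub.mem hm)
      · rw [show (fun g => PySem.List.pyGetD g 0 0) = (fun g : List Int => PySem.List.pyGetD g 0 0) from rfl]
        exact ih _ hlen (hnd.2.sublist hsub)

-- the index/chunk pair list both ports group over
theorem pv_ps_eq (cs : List (List Int)) :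
    (PySem.List.pyRange 0 (PySem.List.len cs) 1).map (fun i => (PySem.List.pyGetD cs i [], i))
      = cs.zipIdx.map (fun p => (p.1, (p.2 : Int))) := by
  rw [PySem.List.len_eq, PySem.List.pyRange_zero_nat, List.map_map]
  refine List.ext_getElem (by simp) ?_
  intro i h1 h2
  have hi : i < cs.length := by simpa using h1
  simp only [List.getElem_map, Function.comp_apply, List.getElem_zipIdx, Nat.zero_add]
  rw [List.getElem_range, PySem.List.pyGetD_natCast, List.getD_eq_getElem cs [] hi]

theorem pvFold_partition (G : List (List Int)) :
    G.foldl (fun acc idxs =>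
        if 1 < idxs.length then (acc.1 ++ [idxs], acc.2)
        else (acc.1, acc.2 ++ [PySem.List.pyGetD idxs 0 0])) ([], [])
      = (G.filter (fun x => decide (1 < x.length)),
         (G.filter (fun x => !decide (1 < x.length))).map (fun x => PySem.List.pyGetD x 0 0)) := by
  have hfun : (fun (acc : List (List Int) × List Int) idxs =>
      if 1 < idxs.length then (acc.1 ++ [idxs], acc.2)
      else (acc.1, acc.2 ++ [PySem.List.pyGetD idxs 0 0]))
      = (fun acc idxs =>
        (if 1 < idxs.length then acc.1 ++ [idxs] else acc.1,
         if ¬ 1 < idxs.length then acc.2 ++ [PySem.List.pyGetD idxs 0 0] else acc.2)) := by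
    funext acc idxs
    by_cases h : 1 < idxs.length <;> simp [h]
  rw [hfun,
    PySem.List.foldl_prod_mk (f := fun a (x : List Int) => if 1 < x.length then a ++ [x] else a)
      (g := fun b (x : List Int) => if ¬ 1 < x.length then b ++ [PySem.List.pyGetD x 0 0] else b),
    PySem.List.foldl_append_ite_eq_filter, PySem.List.foldl_append_ite]
  simp only [List.nil_append]
  refine congrArg _ (congrArg _ (List.filter_congr ?_))
  intro x _
  rw [Bool.eq_iff_iff]
  simp

theorem pvAlt_eq (cs : List (List Int)) :
    matching_array_groups_alt cs =
      ((pvGrp (cs.zipIdx.map (fun p => (p.1, (p.2 : Int))))).filter (fun x => decide (1 < x.length)),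
       ((pvGrp (cs.zipIdx.map (fun p => (p.1, (p.2 : Int))))).filter
          (fun x => !decide (1 < x.length))).map (fun x => PySem.List.pyGetD x 0 0)) := by
  unfold matching_array_groups_alt
  have hfold : cs.zipIdx.foldl
      (fun d p => d.modify p.1 [] (fun v => v ++ [(p.2 : Int)])) PySem.Dict.empty
      = (cs.zipIdx.map (fun p => (p.1, (p.2 : Int)))).foldl
        (fun d p => d.modify p.1 [] (fun v => v ++ [p.2])) PySem.Dict.empty :=
    (List.foldl_map (f := fun p : List Int × Nat => (p.1, (p.2 : Int)))
      (g := fun (d : PySem.Dict (List Int) (List Int)) p => d.modify p.1 [] (fun v => v ++ [p.2]))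
      (l := cs.zipIdx) (init := PySem.Dict.empty)).symm
  rw [hfold]
  set ps := cs.zipIdx.map (fun p => (p.1, (p.2 : Int))) with hps
  have hnodup : (ps.foldl (fun d p => d.modify p.1 [] (fun v => v ++ [p.2]))
      PySem.Dict.empty).keys.Nodup :=
    PySem.Dict.nodup_keys_foldl_modify_key ps (fun p => p.1) []
      (fun _ p => fun v => v ++ [p.2]) PySem.Dict.empty PySem.Dict.nodup_keys_empty
  have hkeys : (ps.foldl (fun d p => d.modify p.1 [] (fun v => v ++ [p.2]))
      PySem.Dict.empty).keys = PySem.Set.ofList (ps.map (·.1)) := by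
    rw [PySem.Dict.keys_foldl_modify_key ps (fun p => p.1) []
      (fun _ p => fun v => v ++ [p.2]) PySem.Dict.empty, PySem.Dict.keys_empty]
    exact PySem.Set.update_empty _
  have hvals : (ps.foldl (fun d p => d.modify p.1 [] (fun v => v ++ [p.2]))
      PySem.Dict.empty).values = pvGrp ps := by
    show ((ps.foldl (fun d p => d.modify p.1 [] (fun v => v ++ [p.2]))
      PySem.Dict.empty).items.map (·.2)) = pvGrp ps
    rw [PySem.Dict.items_eq_map_keys _ hnodup [], hkeys, List.map_map]
    rw [← pvGrp_eq_groups_aux ps.length ps le_rfl]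
    refine List.map_congr_left ?_
    intro c _
    simp only [Function.comp_apply]
    rw [PySem.Dict.getD_foldl_modify_append ps PySem.Dict.empty c, PySem.Dict.getD_empty]
    simp
  show (((ps.foldl (fun d p => d.modify p.1 [] (fun v => v ++ [p.2]))
      PySem.Dict.empty).values).foldl
      (fun acc idxs => if 1 < idxs.length then (acc.1 ++ [idxs], acc.2)
        else (acc.1, acc.2 ++ [PySem.List.pyGetD idxs 0 0])) ([], [])) = _
  rw [hvals, pvFold_partition]

theorem pvMain (cs : List (List Int)) : matching_array_groups cs = matching_array_groups_alt cs := by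
  rw [pvAlt_eq]
  simp only [matching_array_groups]
  rw [pvLoopA_eq]
  simp only [List.nil_append]
  rw [pv_ps_eq]
  set ps := cs.zipIdx.map (fun p => (p.1, (p.2 : Int))) with hps
  set G := pvGrp ps with hG
  have hsnd : ps.map (·.2) = PySem.List.pyRange 0 (PySem.List.len cs) 1 := by
    rw [hps, ← pv_ps_eq, List.map_map]
    simp [Function.comp_def]
  have hnodup2 : (ps.map (·.2)).Nodup := by
    rw [hsnd]
    exact PySem.List.nodup_pyRange_one _ _
  have hne : ∀ g ∈ G, ∃ t l, g = t :: l ∧ t ∈ ps.map (·.2) := pvGrp_mem_aux ps.length ps le_rfl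
  have hheads : (G.map (fun g => PySem.List.pyGetD g 0 0)).Nodup :=
    pvGrp_heads_aux ps.length ps le_rfl hnodup2
  have hS : G.filter (fun x => PySem.List.len x == 1) = G.filter (fun x => !decide (1 < x.length)) := by
    refine List.filter_congr ?_
    intro x hx
    rcases hne x hx with ⟨t, l, he, -⟩
    rw [Bool.eq_iff_iff]
    subst he
    rw [PySem.List.len_eq]
    simp only [beq_iff_eq, Bool.not_eq_eq_eq_not, Bool.not_true, decide_eq_false_iff_not,
      Nat.not_lt, List.length_cons]
    constructor
    · intro h; omega
    · intro h
      have : (t :: l).length = 1 := by simpa using Nat.le_antisymm h (by simp)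
      simp at this
      omega
  rw [hS]
  have hM : G.filter (fun x =>
      !(((G.filter (fun x => !decide (1 < x.length))).map (fun x => PySem.List.pyGetD x 0 0)).contains
        (PySem.List.pyGetD x 0 0)))
      = G.filter (fun x => decide (1 < x.length)) := by
    refine List.filter_congr ?_
    intro x hx
    rw [List.contains_eq_mem, Bool.eq_iff_iff]
    simp only [Bool.not_eq_eq_eq_not, Bool.not_true, decide_eq_false_iff_not, decide_eq_true_eq,
      List.mem_map, List.mem_filter, not_exists, not_and]
    constructor
    · intro h
      by_contra hlen
      exact h x ⟨hx, by simpa using hlen⟩ rfl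
    · intro hlen y hy hhead
      rcases hy with ⟨hyG, hylen⟩
      have hxy : y = x := List.inj_on_of_nodup_map hheads hyG hx hhead
      subst hxy
      simp at hylen
      omega
  rw [hM]

-- ===== VERDICT (by name: the statement is the Claim_ definition above) =====
theorem matching_array_groups_spec : Claim_equal_matching_array_groups := by
  intro datachunks_list _
  exact pvMain datachunks_list
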